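-- pv_equiv track=rewrite | github.com/jamesconfy/Algorithms | Python/pickNumbers.py | pickNumbers
-- ===== SOURCE A (Python) =====
-- def pickNumbers(arr):
--     arr.sort()
--     maxCount = 0
--     key = arr[0]
--     i = 0
--     for i in range(len(arr)):
--         count = 0
--         for j in range(1+i, len(arr)):
--             if abs(arr[i] - arr[j]) <= 1:
--                 count += 1
--
--         if maxCount < count:
--             maxCount = count
--
--     return maxCount + 1
-- ===== SOURCE B (Python) =====
-- def pickNumbers(arr):
--     freq = {}
--     for x in arr:
--         freq[x] = freq.get(x, 0) + 1
--     return max(freq[v] + freq.get(v + 1, 0) for v in freq)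
-- ===== Notes on version B (the rewrite author's own statement) =====
-- stated objective: faster
-- what changed: replaced the sort plus quadratic pairwise-count loops by a single frequency-dictionary pass and a max of freq[v]+freq[v+1] over the distinct values
-- outside the precondition, e.g. on pickNumbers([]): A raises IndexError, B raises ValueError
import Mathlib
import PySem

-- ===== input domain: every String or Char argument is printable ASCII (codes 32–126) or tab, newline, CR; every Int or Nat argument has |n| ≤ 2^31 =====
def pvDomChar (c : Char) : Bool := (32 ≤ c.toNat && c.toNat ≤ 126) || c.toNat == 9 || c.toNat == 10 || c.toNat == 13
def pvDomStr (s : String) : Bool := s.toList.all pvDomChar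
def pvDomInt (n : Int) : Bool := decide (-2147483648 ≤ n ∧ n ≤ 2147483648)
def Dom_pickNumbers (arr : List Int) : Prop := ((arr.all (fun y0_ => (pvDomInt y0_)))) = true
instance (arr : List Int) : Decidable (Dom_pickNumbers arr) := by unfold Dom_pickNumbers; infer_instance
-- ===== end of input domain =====

-- B replaces A's sort + quadratic pairwise-count loops by one frequency-dict pass and a max of freq[v]+freq[v+1] (objective: faster).
-- Python A sorts arr IN PLACE; the equivalence proved here is about the RETURN value only (B does not mutate its argument).

-- ===== PORT A =====
-- inner loop 'for j in range(1+i, len(arr)): if abs(arr[i] - arr[j]) <= 1: count += 1'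
def pickInner (s : List Int) (i : Int) : Int :=
  (PySem.List.pyRange (1 + i) (PySem.List.len s) 1).foldl
    (fun count j =>
      if (PySem.List.pyGetD s i 0 - PySem.List.pyGetD s j 0).natAbs ≤ 1 then count + 1
      else count) 0

-- 'key = arr[0]' raises IndexError on []; Pre_ excludes the empty list; key is never used afterwards
def pickNumbers (arr : List Int) : Int :=
  let s := PySem.List.sorted arr (fun x => x) false
  let maxCount := (PySem.List.pyRange 0 (PySem.List.len s) 1).foldl
    (fun maxCount i =>
      let count := pickInner s i
      if maxCount < count then count else maxCount) 0
  maxCount + 1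

-- ===== PORT B =====
def pickNumbers_alt (arr : List Int) : Int :=
  let freq := arr.foldl (fun d x => d.insert x (d.getD x 0 + 1)) PySem.Dict.empty
  -- 'max(freq[v] + freq.get(v+1, 0) for v in freq)' — max of an empty generator raises ValueError, excluded by Pre_
  (PySem.List.max? (freq.keys.map (fun v => freq.getD v 0 + freq.getD (v + 1) 0))
      (fun y => y)).getD 0

-- ===== PRECONDITION & SPEC =====
-- on [] A raises IndexError at 'arr[0]' (and B's max raises ValueError); Pre_ excludes only the empty list
def Pre_pickNumbers (arr : List Int) : Prop := arr ≠ []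
instance (arr : List Int) : Decidable (Pre_pickNumbers arr) := by unfold Pre_pickNumbers; infer_instance
def pvWitness_pickNumbers : List Int := [4, 6, 5, 3, 3, 1]

def Spec_pickNumbers (arr : List Int) (out : Int) : Prop := out = pickNumbers_alt arr
instance (arr : List Int) (out : Int) : Decidable (Spec_pickNumbers arr out) := by unfold Spec_pickNumbers; infer_instance

-- ===== CLAIM (what is proved, stated in full; the proofs are below) =====
def Claim_equal_pickNumbers : Prop := ∀ (arr : List Int), Dom_pickNumbers arr → Pre_pickNumbers arr → Spec_pickNumbers arr (pickNumbers arr)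

-- ===== LEMMAS AND PROOFS =====

-- pvF l v = count of v plus count of v+1 in l (the quantity B maximises)
def pvF (l : List Int) (v : Int) : Int := (l.count v : Int) + (l.count (v + 1) : Int)

-- what A's inner loop counts at the head of the (sorted) list
def pvCnt (h : Int) (t : List Int) : Int :=
  (t.countP (fun x => decide ((h - x).natAbs ≤ 1)) : Int)

-- structural form of A's outer-loop value (maxCount)
def pvG : List Int → Int
  | [] => 0
  | h :: t => max (pvCnt h t) (pvG t)

-- A's inner count at index k, in drop form
def pvC (s : List Int) (k : Nat) : Int :=
  ((s.drop (k + 1)).countP (fun x => decide ((s.getD k 0 - x).natAbs ≤ 1)) : Int)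

lemma pvIfMax (m c : Int) : (if m < c then c else m) = max m c := by
  rw [max_def]; split_ifs <;> omega

-- pull a max out of a running-max fold
lemma pvFoldlMaxPull {α : Type} (g : α → Int) (l : List α) :
    ∀ a b : Int, l.foldl (fun m x => max m (g x)) (max a b) = max a (l.foldl (fun m x => max m (g x)) b) := by
  induction l with
  | nil => intro a b; simp
  | cons x t ih =>
    intro a b
    simp only [List.foldl_cons, max_assoc]
    exact ih a (max b (g x))

lemma pvInner_eq (s : List Int) (k : Nat) : pickInner s (k : Int) = pvC s k := by
  unfold pickInner pvC
  rw [PySem.List.foldl_pyRange_pyGetD s 0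
      (fun count x => if (PySem.List.pyGetD s (k:Int) 0 - x).natAbs ≤ 1 then count + 1 else count)
      0 (by positivity)]
  rw [PySem.List.foldl_ite_add_one]
  simp [add_comm]

lemma pvC_cons_succ (h : Int) (t : List Int) (k : Nat) : pvC (h :: t) (k + 1) = pvC t k := by
  simp [pvC]

lemma pvC_cons_zero (h : Int) (t : List Int) : pvC (h :: t) 0 = pvCnt h t := by
  simp [pvC, pvCnt]

lemma pvOuter (s : List Int) :
    (List.range s.length).foldl (fun m k => max m (pvC s k)) 0 = pvG s := by
  induction s with
  | nil => simp [pvG]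
  | cons h t ih =>
    rw [List.length_cons, List.range_succ_eq_map, List.foldl_cons, List.foldl_map]
    simp only [pvC_cons_zero, Nat.succ_eq_add_one, pvC_cons_succ]
    have : (max 0 (pvCnt h t)) = max (pvCnt h t) 0 := max_comm _ _
    rw [this, pvFoldlMaxPull (fun k => pvC t k) (List.range t.length) (pvCnt h t) 0, ih, pvG]

lemma pvA_eq (arr : List Int) :
    pickNumbers arr = pvG (PySem.List.sorted arr (fun x => x) false) + 1 := by
  unfold pickNumbers
  set s := PySem.List.sorted arr (fun x => x) false with hs
  simp only [PySem.List.len_eq, PySem.List.pyRange_zero_nat, List.foldl_map]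
  have hc := PySem.List.foldl_congr_mem (l := List.range s.length) (init := (0:Int))
      (f := fun m k => if m < pickInner s (k:Int) then pickInner s (k:Int) else m)
      (g := fun m k => max m (pvC s k))
      (by intro acc x hx; simp only [pvInner_eq, pvIfMax])
  rw [hc, pvOuter]

lemma pvCnt_eq (h : Int) (t : List Int) (hle : ∀ x ∈ t, h ≤ x) :
    pvCnt h t + 1 = pvF (h :: t) h := by
  unfold pvCnt pvF
  have hc : t.countP (fun x => decide ((h - x).natAbs ≤ 1)) = t.count h + t.count (h + 1) := by
    induction t with
    | nil => simp
    | cons x t ih =>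
      have hx : h ≤ x := hle x (by simp)
      have ih' := ih (fun y hy => hle y (by simp [hy]))
      simp only [List.countP_cons, List.count_cons, ih']
      by_cases h1 : x = h
      · simp [h1]; omega
      · by_cases h2 : x = h + 1
        · simp [h2]; omega
        · have : ¬ ((h - x).natAbs ≤ 1) := by omega
          simp [h1, h2, this]
  rw [hc]
  simp
  omega

lemma pvF_cons (h : Int) (t : List Int) (v : Int) :
    pvF (h :: t) v = pvF t v + (if v = h then 1 else 0) + (if v + 1 = h then 1 else 0) := by
  unfold pvF
  simp only [List.count_cons]
  by_cases h1 : v = h <;> by_cases h2 : v + 1 = h <;> simp [h1, h2] <;> omega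

lemma pvMaxCongr (c : Int) (g₁ g₂ : Int → Int) :
    ∀ (l : List Int) (b₁ b₂ : Int), b₁ ≤ b₂ → (b₂ ≤ c ∨ b₁ = b₂) →
      (∀ x ∈ l, g₁ x ≤ g₂ x ∧ (g₂ x ≤ c ∨ g₁ x = g₂ x)) →
      max c (l.foldl (fun m x => max m (g₁ x)) b₁) = max c (l.foldl (fun m x => max m (g₂ x)) b₂) := by
  intro l
  induction l with
  | nil => intro b₁ b₂ h1 h2 _; simp only [List.foldl_nil]; omega
  | cons x t ih =>
    intro b₁ b₂ h1 h2 h3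
    simp only [List.foldl_cons]
    have hx := h3 x (by simp)
    exact ih (max b₁ (g₁ x)) (max b₂ (g₂ x)) (by omega) (by omega)
      (fun y hy => h3 y (by simp [hy]))

-- on a sorted nonempty list, A's maxCount + 1 is the running max of pvF over the list
lemma pvSortedMax (t : List Int) : ∀ h : Int, (h :: t).Pairwise (· ≤ ·) →
    pvG (h :: t) + 1 = t.foldl (fun m x => max m (pvF (h :: t) x)) (pvF (h :: t) h) := by
  induction t with
  | nil =>
    intro h _
    simp [pvG, pvCnt, pvF, List.count_cons]
  | cons h' t' ih =>
    intro h hp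
    have hle : ∀ x ∈ h' :: t', h ≤ x := (List.pairwise_cons.mp hp).1
    have hp' : (h' :: t').Pairwise (· ≤ ·) := (List.pairwise_cons.mp hp).2
    have hih := ih h' hp'
    have hkey : ∀ x, h ≤ x →
        pvF (h' :: t') x ≤ pvF (h :: h' :: t') x ∧
        (pvF (h :: h' :: t') x ≤ pvF (h :: h' :: t') h ∨ pvF (h' :: t') x = pvF (h :: h' :: t') x) := by
      intro x hx
      have hc := pvF_cons h (h' :: t') x
      by_cases h1 : x = h
      · subst h1
        constructor
        · rw [hc]; split_ifs <;> omega
        · left; rfl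
      · have h2 : ¬ (x + 1 = h) := by omega
        rw [hc]
        simp [h1, h2]
    have LHS : pvG (h :: h' :: t') + 1
        = max (pvF (h :: h' :: t') h) (pvG (h' :: t') + 1) := by
      show max (pvCnt h (h' :: t')) (pvG (h' :: t')) + 1 = _
      rw [← pvCnt_eq h (h' :: t') hle]
      omega
    rw [LHS, hih]
    rw [List.foldl_cons,
        pvFoldlMaxPull (pvF (h :: h' :: t')) t' (pvF (h :: h' :: t') h) (pvF (h :: h' :: t') h')]
    apply pvMaxCongr
    · exact (hkey h' (hle h' (by simp))).1
    · rcases (hkey h' (hle h' (by simp))).2 with h1 | h2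
      · exact Or.inl h1
      · exact Or.inr h2
    · intro x hx
      exact hkey x (hle x (by simp [hx]))

-- the max of a nonempty list depends only on its members
lemma pvMaxEq (a b : Int) (l₁ l₂ : List Int) (h : ∀ x, x ∈ a :: l₁ ↔ x ∈ b :: l₂) :
    l₁.foldl max a = l₂.foldl max b := by
  have key : ∀ (a b : Int) (l₁ l₂ : List Int), (∀ x, x ∈ a :: l₁ → x ∈ b :: l₂) →
      l₁.foldl max a ≤ l₂.foldl max b := by
    intro a b l₁ l₂ hsub
    have hm : l₁.foldl max a ∈ a :: l₁ := by
      rcases PySem.List.foldl_max_mem l₁ a with h1 | h1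
      · rw [h1]; simp
      · simp [h1]
    have := hsub _ hm
    rcases List.mem_cons.mp this with h1 | h1
    · rw [h1]; exact (PySem.List.le_foldl_max l₂ b).1
    · exact (PySem.List.le_foldl_max l₂ b).2 _ h1
  exact le_antisymm (key a b l₁ l₂ (fun x hx => (h x).mp hx))
    (key b a l₂ l₁ (fun x hx => (h x).mpr hx))

lemma pvAlt_eq (arr : List Int) (d₀ : Int) (drest : List Int)
    (hd : PySem.List.dedup arr = d₀ :: drest) :
    pickNumbers_alt arr = (drest.map (pvF arr)).foldl max (pvF arr d₀) := by
  unfold pickNumbers_alt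
  rw [PySem.Dict.foldl_insert_getD_add_one_eq_counter]
  show (PySem.List.max? (((PySem.Dict.counter arr).keys).map
      (fun v => (PySem.Dict.counter arr).getD v 0 + (PySem.Dict.counter arr).getD (v + 1) 0))
      (fun y => y)).getD 0 = _
  rw [PySem.Dict.keys_counter]
  have hof : PySem.Set.ofList arr = d₀ :: drest := by rw [← PySem.List.dedup_eq_ofList, hd]
  rw [hof]
  have hmap : (d₀ :: drest).map
        (fun v => (PySem.Dict.counter arr).getD v 0 + (PySem.Dict.counter arr).getD (v + 1) 0)
      = (d₀ :: drest).map (pvF arr) := by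
    apply List.map_congr_left
    intro x hx
    simp [PySem.Dict.getD_counter, pvF]
  rw [hmap, List.map_cons, PySem.List.max?_id_cons]
  simp

lemma pvMain (arr : List Int) (hne : arr ≠ []) : pickNumbers arr = pickNumbers_alt arr := by
  have hsne : PySem.List.sorted arr (fun x => x) false ≠ [] := by
    intro hcon; exact hne ((PySem.List.sorted_eq_nil_iff arr (fun x => x) false).mp hcon)
  obtain ⟨h, t, hst⟩ := List.exists_cons_of_ne_nil hsne
  have hdne : PySem.List.dedup arr ≠ [] := by
    intro hcon
    obtain ⟨a, ha⟩ := List.exists_mem_of_ne_nil arr hne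
    have := (PySem.List.mem_dedup arr a).mpr ha
    rw [hcon] at this; simp at this
  obtain ⟨d₀, drest, hd⟩ := List.exists_cons_of_ne_nil hdne
  have hcount : ∀ v, pvF (PySem.List.sorted arr (fun x => x) false) v = pvF arr v := by
    intro v
    unfold pvF
    rw [(PySem.List.sorted_perm arr (fun x => x) false).count_eq,
        (PySem.List.sorted_perm arr (fun x => x) false).count_eq]
  have hpair : (h :: t).Pairwise (· ≤ ·) := by
    have := PySem.List.sorted_pairwise arr (fun x => x)
    rw [hst] at this; exact this
  rw [pvA_eq, hst, pvSortedMax t h hpair, pvAlt_eq arr d₀ drest hd]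
  have hmapeq : (fun m x => max m (pvF (h :: t) x)) = (fun m x => max m (pvF arr x)) := by
    funext m x
    rw [show pvF (h :: t) x = pvF arr x from by rw [← hst]; exact hcount x]
  rw [hmapeq]
  rw [← List.foldl_map (f := pvF arr) (g := max) (l := t)]
  have hFh : pvF (h :: t) h = pvF arr h := by rw [← hst]; exact hcount h
  rw [hFh]
  apply pvMaxEq
  intro x
  rw [← List.map_cons, ← List.map_cons]
  constructor
  · intro hx
    obtain ⟨v, hv, hvx⟩ := List.mem_map.mp hx
    apply List.mem_map.mpr
    refine ⟨v, ?_, hvx⟩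
    rw [← hd]
    apply (PySem.List.mem_dedup arr v).mpr
    have : v ∈ PySem.List.sorted arr (fun x => x) false := by rw [hst]; exact hv
    exact (PySem.List.mem_sorted arr (fun x => x) false v).mp this
  · intro hx
    obtain ⟨v, hv, hvx⟩ := List.mem_map.mp hx
    apply List.mem_map.mpr
    refine ⟨v, ?_, hvx⟩
    rw [← hst]
    apply (PySem.List.mem_sorted arr (fun x => x) false v).mpr
    apply (PySem.List.mem_dedup arr v).mp
    rw [hd]; exact hv

-- ===== VERDICT (by name: the statement is the Claim_ definition above) =====
theorem pickNumbers_spec : Claim_equal_pickNumbers := by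
  intro arr _ hpre
  unfold Spec_pickNumbers
  exact pvMain arr hpre
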